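-- pv_equiv track=rewrite | github.com/coolsidd/nroer_to_discourse | markdown.py | markdown_image
-- ===== SOURCE A (Python) =====
-- def markdown_image(
--     title, content, image, license, source, authors, collection, location, annotations
-- ):
--     template = """# {}
-- ### {}
-- {}
-- ##### *License*: {}
-- ##### *Source*: {}
-- {}"""
--     footnote = ""
--     if len(authors) != 0:
--         footnote += "##### Authors: "
--         for author in authors[:-1]:
--             footnote += "{}, ".format(author)
--         footnote += "{}\n".format(authors[-1])
--     if len(collection) != 0:
--         footnote += "##### Collection: "
--         for collec in collection[:-1]:
--             footnote += "{}, ".format(collec)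
--         footnote += "{}\n".format(collection[-1])
--     if len(location) != 0:
--         footnote += "##### Location: "
--         for loc in location[:-1]:
--             footnote += "{}, ".format(loc)
--         footnote += "{}".format(location[-1])
--     if len(annotations) != 0:
--         footnote += "##### Annotation: "
--         for ano in annotations[:-1]:
--             footnote += "{}, ".format(ano)
--         footnote += "{}".format(annotations[-1])
--     return template.format(title, content, image, license, source, footnote)
-- ===== SOURCE B (Python) =====
-- def markdown_image(
--     title, content, image, license, source, authors, collection, location, annotations
-- ):
--     sections = [
--         ("Authors", authors, "\n"),
--         ("Collection", collection, "\n"),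
--         ("Location", location, ""),
--         ("Annotation", annotations, ""),
--     ]
--     footnote = "".join(
--         "##### {}: ".format(label) + ", ".join(str(x) for x in data) + suffix
--         for label, data, suffix in sections
--         if data
--     )
--     return "# {}\n### {}\n{}\n##### *License*: {}\n##### *Source*: {}\n{}".format(
--         title, content, image, license, source, footnote
--     )
-- ===== Notes on version B (the rewrite author's own statement) =====
-- stated objective: simpler
-- what changed: Replaces four copy-pasted per-section accumulator loops (manual comma-suffix loop over xs[:-1] plus a last-element special case) by one data-driven pass over a (label, data, suffix) table using ', '.join.
import Mathlib
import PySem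

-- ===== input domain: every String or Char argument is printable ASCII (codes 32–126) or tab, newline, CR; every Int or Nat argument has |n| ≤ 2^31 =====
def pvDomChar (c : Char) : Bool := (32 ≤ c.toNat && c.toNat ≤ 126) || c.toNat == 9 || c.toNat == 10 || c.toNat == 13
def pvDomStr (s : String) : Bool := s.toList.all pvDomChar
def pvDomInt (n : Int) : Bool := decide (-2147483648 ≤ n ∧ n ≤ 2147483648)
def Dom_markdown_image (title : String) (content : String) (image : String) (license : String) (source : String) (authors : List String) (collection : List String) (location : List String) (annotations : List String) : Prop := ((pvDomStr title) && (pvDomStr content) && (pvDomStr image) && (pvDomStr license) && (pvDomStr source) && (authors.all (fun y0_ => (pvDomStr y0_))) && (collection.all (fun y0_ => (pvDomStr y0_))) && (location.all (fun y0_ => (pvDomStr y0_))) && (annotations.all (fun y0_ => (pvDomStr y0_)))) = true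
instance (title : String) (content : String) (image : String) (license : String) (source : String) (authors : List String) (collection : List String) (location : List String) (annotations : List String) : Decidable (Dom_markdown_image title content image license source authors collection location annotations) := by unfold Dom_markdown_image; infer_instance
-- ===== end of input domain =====

-- B replaces A's four copy-pasted per-section loops by one data-driven pass over a (label, data, suffix) table with a join; objective: simpler.
-- ===== PORT A =====
def markdown_image (title : String) (content : String) (image : String) (license : String) (source : String) (authors : List String) (collection : List String) (location : List String) (annotations : List String) : String :=
  let footnote := ""
  let footnote :=
    if authors.length ≠ 0 then
      (authors.dropLast.foldl (fun acc author => acc ++ author ++ ", ") (footnote ++ "##### Authors: "))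
        ++ authors.getLast! ++ "\n"
    else footnote
  let footnote :=
    if collection.length ≠ 0 then
      (collection.dropLast.foldl (fun acc collec => acc ++ collec ++ ", ") (footnote ++ "##### Collection: "))
        ++ collection.getLast! ++ "\n"
    else footnote
  let footnote :=
    if location.length ≠ 0 then
      (location.dropLast.foldl (fun acc loc => acc ++ loc ++ ", ") (footnote ++ "##### Location: "))
        ++ location.getLast!
    else footnote
  let footnote :=
    if annotations.length ≠ 0 then
      (annotations.dropLast.foldl (fun acc ano => acc ++ ano ++ ", ") (footnote ++ "##### Annotation: "))
        ++ annotations.getLast!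
    else footnote
  "# " ++ title ++ "\n### " ++ content ++ "\n" ++ image ++ "\n##### *License*: " ++ license
    ++ "\n##### *Source*: " ++ source ++ "\n" ++ footnote

-- ===== PORT B =====
-- pvJoin is an exact hand-port of Python's sep.join(list of strings)
def pvJoin (sep : String) : List String → String
  | [] => ""
  | [x] => x
  | x :: y :: ys => x ++ sep ++ pvJoin sep (y :: ys)

def markdown_image_alt (title : String) (content : String) (image : String) (license : String) (source : String) (authors : List String) (collection : List String) (location : List String) (annotations : List String) : String :=
  let sections : List (String × List String × String) :=
    [("Authors", authors, "\n"), ("Collection", collection, "\n"),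
     ("Location", location, ""), ("Annotation", annotations, "")]
  let footnote := String.join
    ((sections.filter (fun sec => !sec.2.1.isEmpty)).map
      (fun sec => "##### " ++ sec.1 ++ ": " ++ pvJoin ", " sec.2.1 ++ sec.2.2))
  "# " ++ title ++ "\n### " ++ content ++ "\n" ++ image ++ "\n##### *License*: " ++ license
    ++ "\n##### *Source*: " ++ source ++ "\n" ++ footnote

-- ===== PRECONDITION & SPEC =====
def Spec_markdown_image (title : String) (content : String) (image : String) (license : String) (source : String) (authors : List String) (collection : List String) (location : List String) (annotations : List String) (out : String) : Prop := out = markdown_image_alt title content image license source authors collection location annotations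
instance (title : String) (content : String) (image : String) (license : String) (source : String) (authors : List String) (collection : List String) (location : List String) (annotations : List String) (out : String) : Decidable (Spec_markdown_image title content image license source authors collection location annotations out) := by unfold Spec_markdown_image; infer_instance

-- ===== CLAIM (what is proved, stated in full; the proofs are below) =====
def Claim_equal_markdown_image : Prop := ∀ (title : String) (content : String) (image : String) (license : String) (source : String) (authors : List String) (collection : List String) (location : List String) (annotations : List String), Dom_markdown_image title content image license source authors collection location annotations → Spec_markdown_image title content image license source authors collection location annotations (markdown_image title content image license source authors collection location annotations)

-- ===== LEMMAS AND PROOFS =====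

theorem pvSect (xs : List String) (p : String) (h : xs ≠ []) :
    List.foldl (fun acc a => acc ++ (a ++ ", ")) p xs.dropLast ++ xs.getLast?.getD "" =
      p ++ pvJoin ", " xs := by
  induction xs generalizing p with
  | nil => exact absurd rfl h
  | cons x ys ih =>
    cases ys with
    | nil => simp [pvJoin]
    | cons y zs =>
      have hih := ih (p := p ++ (x ++ ", ")) (by simp)
      simp only [List.dropLast_cons₂, List.foldl_cons, List.getLast?_cons_cons] at *
      rw [hih]
      simp [pvJoin, String.append_assoc]

theorem pvSectQ (xs : List String) (p q : String) (h : xs ≠ []) :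
    List.foldl (fun acc a => acc ++ (a ++ ", ")) p xs.dropLast ++ (xs.getLast?.getD "" ++ q) =
      p ++ (pvJoin ", " xs ++ q) := by
  rw [← String.append_assoc, pvSect xs p h, String.append_assoc]

theorem pvLabA (s : String) : "##### " ++ ("Authors" ++ (": " ++ s)) = "##### Authors: " ++ s := by
  rw [← String.append_assoc, ← String.append_assoc]
  exact congrArg (· ++ s) (by decide)

theorem pvLabC (s : String) : "##### " ++ ("Collection" ++ (": " ++ s)) = "##### Collection: " ++ s := by
  rw [← String.append_assoc, ← String.append_assoc]
  exact congrArg (· ++ s) (by decide)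

theorem pvLabL (s : String) : "##### " ++ ("Location" ++ (": " ++ s)) = "##### Location: " ++ s := by
  rw [← String.append_assoc, ← String.append_assoc]
  exact congrArg (· ++ s) (by decide)

theorem pvLabN (s : String) : "##### " ++ ("Annotation" ++ (": " ++ s)) = "##### Annotation: " ++ s := by
  rw [← String.append_assoc, ← String.append_assoc]
  exact congrArg (· ++ s) (by decide)

theorem pvNlA (s : String) : "\n" ++ ("##### Authors: " ++ s) = "\n##### Authors: " ++ s := by
  rw [← String.append_assoc]
  exact congrArg (· ++ s) (by decide)

theorem pvNlC (s : String) : "\n" ++ ("##### Collection: " ++ s) = "\n##### Collection: " ++ s := by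
  rw [← String.append_assoc]
  exact congrArg (· ++ s) (by decide)

theorem pvNlL (s : String) : "\n" ++ ("##### Location: " ++ s) = "\n##### Location: " ++ s := by
  rw [← String.append_assoc]
  exact congrArg (· ++ s) (by decide)

theorem pvNlN (s : String) : "\n" ++ ("##### Annotation: " ++ s) = "\n##### Annotation: " ++ s := by
  rw [← String.append_assoc]
  exact congrArg (· ++ s) (by decide)

-- ===== VERDICT (by name: the statement is the Claim_ definition above) =====
theorem markdown_image_spec : Claim_equal_markdown_image := by
  intro title content image license source authors collection location annotations _
  unfold Spec_markdown_image markdown_image markdown_image_alt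
  cases authors with
  | nil => cases collection with
    | nil => cases location with
      | nil => cases annotations with
        | nil => simp [pvSect, pvSectQ, pvLabA, pvLabC, pvLabL, pvLabN, pvNlA, pvNlC, pvNlL, pvNlN, String.append_assoc, String.join]
        | cons d ds => simp [pvSect, pvSectQ, pvLabA, pvLabC, pvLabL, pvLabN, pvNlA, pvNlC, pvNlL, pvNlN, String.append_assoc, String.join]
      | cons c cs => cases annotations with
        | nil => simp [pvSect, pvSectQ, pvLabA, pvLabC, pvLabL, pvLabN, pvNlA, pvNlC, pvNlL, pvNlN, String.append_assoc, String.join]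
        | cons d ds => simp [pvSect, pvSectQ, pvLabA, pvLabC, pvLabL, pvLabN, pvNlA, pvNlC, pvNlL, pvNlN, String.append_assoc, String.join]
    | cons b bs => cases location with
      | nil => cases annotations with
        | nil => simp [pvSect, pvSectQ, pvLabA, pvLabC, pvLabL, pvLabN, pvNlA, pvNlC, pvNlL, pvNlN, String.append_assoc, String.join]
        | cons d ds => simp [pvSect, pvSectQ, pvLabA, pvLabC, pvLabL, pvLabN, pvNlA, pvNlC, pvNlL, pvNlN, String.append_assoc, String.join]
      | cons c cs => cases annotations with
        | nil => simp [pvSect, pvSectQ, pvLabA, pvLabC, pvLabL, pvLabN, pvNlA, pvNlC, pvNlL, pvNlN, String.append_assoc, String.join]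
        | cons d ds => simp [pvSect, pvSectQ, pvLabA, pvLabC, pvLabL, pvLabN, pvNlA, pvNlC, pvNlL, pvNlN, String.append_assoc, String.join]
  | cons a as => cases collection with
    | nil => cases location with
      | nil => cases annotations with
        | nil => simp [pvSect, pvSectQ, pvLabA, pvLabC, pvLabL, pvLabN, pvNlA, pvNlC, pvNlL, pvNlN, String.append_assoc, String.join]
        | cons d ds => simp [pvSect, pvSectQ, pvLabA, pvLabC, pvLabL, pvLabN, pvNlA, pvNlC, pvNlL, pvNlN, String.append_assoc, String.join]
      | cons c cs => cases annotations with
        | nil => simp [pvSect, pvSectQ, pvLabA, pvLabC, pvLabL, pvLabN, pvNlA, pvNlC, pvNlL, pvNlN, String.append_assoc, String.join]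
        | cons d ds => simp [pvSect, pvSectQ, pvLabA, pvLabC, pvLabL, pvLabN, pvNlA, pvNlC, pvNlL, pvNlN, String.append_assoc, String.join]
    | cons b bs => cases location with
      | nil => cases annotations with
        | nil => simp [pvSect, pvSectQ, pvLabA, pvLabC, pvLabL, pvLabN, pvNlA, pvNlC, pvNlL, pvNlN, String.append_assoc, String.join]
        | cons d ds => simp [pvSect, pvSectQ, pvLabA, pvLabC, pvLabL, pvLabN, pvNlA, pvNlC, pvNlL, pvNlN, String.append_assoc, String.join]
      | cons c cs => cases annotations with
        | nil => simp [pvSect, pvSectQ, pvLabA, pvLabC, pvLabL, pvLabN, pvNlA, pvNlC, pvNlL, pvNlN, String.append_assoc, String.join]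
        | cons d ds => simp [pvSect, pvSectQ, pvLabA, pvLabC, pvLabL, pvLabN, pvNlA, pvNlC, pvNlL, pvNlN, String.append_assoc, String.join]
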